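-- pv_equiv track=rewrite | github.com/justawalnut/ZerodhaCLI | src/zerodhacli/cli/app.py | _parse_cancel_flags
-- ===== SOURCE A (Python) =====
-- from typing import List, Optional, Sequence, Tuple
--
-- def _parse_cancel_flags(tokens: Sequence[str]) -> Tuple[List[str], bool, bool]:
--     include_protected = False
--     confirm = False
--     filtered: List[str] = []
--     for token in tokens:
--         if token == "--include-protected":
--             include_protected = True
--         elif token == "--confirm":
--             confirm = True
--         else:
--             filtered.append(token)
--     return filtered, include_protected, confirm
-- ===== SOURCE B (Python) =====
-- from typing import List, Sequence, Tuple
--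
-- _FLAGS = {"--include-protected", "--confirm"}
--
-- def _parse_cancel_flags(tokens: Sequence[str]) -> Tuple[List[str], bool, bool]:
--     include_protected = "--include-protected" in tokens
--     confirm = "--confirm" in tokens
--     filtered = [t for t in tokens if t not in _FLAGS]
--     return filtered, include_protected, confirm
-- ===== Notes on version B (the rewrite author's own statement) =====
-- stated objective: idiomatic
-- what changed: Replaced the single stateful accumulating loop with two independent membership tests for the flags and a filtering comprehension for the remaining tokens.
import Mathlib
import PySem

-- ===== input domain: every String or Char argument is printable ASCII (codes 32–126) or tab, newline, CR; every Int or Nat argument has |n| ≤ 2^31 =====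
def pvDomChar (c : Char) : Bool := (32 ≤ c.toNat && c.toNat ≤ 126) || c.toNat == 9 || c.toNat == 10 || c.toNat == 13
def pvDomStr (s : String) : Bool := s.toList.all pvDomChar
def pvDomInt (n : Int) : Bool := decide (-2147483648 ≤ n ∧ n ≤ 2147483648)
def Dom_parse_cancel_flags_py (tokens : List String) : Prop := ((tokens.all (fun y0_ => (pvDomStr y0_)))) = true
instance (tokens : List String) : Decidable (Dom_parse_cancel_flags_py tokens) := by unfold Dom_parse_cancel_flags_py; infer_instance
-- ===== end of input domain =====

-- B replaces A's single stateful accumulating pass by two independent membership tests plus a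
-- filtering comprehension (objective: idiomatic; same asymptotic cost).

-- ===== PORT A =====
-- literal port of A's for-loop: one fold over the state (filtered, include_protected, confirm)
def parse_cancel_flags_py (tokens : List String) : List String × Bool × Bool :=
  let st := tokens.foldl
    (fun (st : List String × Bool × Bool) token =>
      if token = "--include-protected" then (st.1, true, st.2.2)
      else if token = "--confirm" then (st.1, st.2.1, true)
      else (st.1 ++ [token], st.2.1, st.2.2))
    ([], false, false)
  st

-- ===== PORT B =====
-- membership tests on the whole list, plus a filter
def parse_cancel_flags_py_alt (tokens : List String) : List String × Bool × Bool :=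
  let include_protected := tokens.contains "--include-protected"
  let confirm := tokens.contains "--confirm"
  let filtered := tokens.filter
    (fun t => ¬ (t = "--include-protected" ∨ t = "--confirm"))
  (filtered, include_protected, confirm)

-- ===== PRECONDITION & SPEC =====
def Spec_parse_cancel_flags_py (tokens : List String) (out : List String × Bool × Bool) : Prop := out = parse_cancel_flags_py_alt tokens
instance (tokens : List String) (out : List String × Bool × Bool) : Decidable (Spec_parse_cancel_flags_py tokens out) := by unfold Spec_parse_cancel_flags_py; infer_instance

-- ===== CLAIM (what is proved, stated in full; the proofs are below) =====
def Claim_equal_parse_cancel_flags_py : Prop := ∀ (tokens : List String), Dom_parse_cancel_flags_py tokens → Spec_parse_cancel_flags_py tokens (parse_cancel_flags_py tokens)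

-- ===== LEMMAS AND PROOFS =====

-- invariant for A's fold, generalized over the starting state
theorem pv_fold_inv (tokens : List String) (acc : List String) (ip c : Bool) :
    tokens.foldl
      (fun (st : List String × Bool × Bool) token =>
        if token = "--include-protected" then (st.1, true, st.2.2)
        else if token = "--confirm" then (st.1, st.2.1, true)
        else (st.1 ++ [token], st.2.1, st.2.2))
      (acc, ip, c)
    = (acc ++ tokens.filter (fun t => ¬ (t = "--include-protected" ∨ t = "--confirm")),
       ip || tokens.contains "--include-protected",
       c || tokens.contains "--confirm") := by
  induction tokens generalizing acc ip c with
  | nil => simp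
  | cons h t ih =>
    by_cases h1 : h = "--include-protected"
    · subst h1
      simp [List.foldl, ih, List.filter]
    · by_cases h2 : h = "--confirm"
      · subst h2
        simp [List.foldl, ih, List.filter]
      · simp [List.foldl, h1, h2, Ne.symm h1, Ne.symm h2, ih, List.filter]

-- ===== VERDICT (by name: the statement is the Claim_ definition above) =====
theorem parse_cancel_flags_py_spec : Claim_equal_parse_cancel_flags_py := by
  intro tokens _
  unfold Spec_parse_cancel_flags_py parse_cancel_flags_py parse_cancel_flags_py_alt
  simp [pv_fold_inv]
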